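-- pv_equiv track=rewrite | github.com/lavernac/3d_graphs_for_serj | csv_read.py | rebuild_data
-- ===== SOURCE A (Python) =====
-- def append_data(raw_data, rebuilded_data, dimension, i):
--     for key in raw_data.keys():
--         rebuilded_data[key][dimension].append(raw_data[key][i])
--
-- def append_df_list(raw_data, rebuilded_data, dimension, i):
--     for key in rebuilded_data.keys():
--         rebuilded_data[key].append([])
--     append_data(raw_data, rebuilded_data, dimension, i)
--
-- def find_shortest_list(i, rebuilded_data, dimension, min_dimension_size):
--     if i != 0 and len(rebuilded_data['x'][dimension-1]) < min_dimension_size: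
--         min_dimension_size = len(rebuilded_data['x'][dimension-1])
--     return min_dimension_size
--
-- def rebuild_data(raw_data):
--     dimension = 0
--     rebuilded_data = {'x': [], 'y': [], 'z': []}
--     min_dimension_size = 2**30
--     for i in range(0, len(raw_data['x'])):
--         if i == 0 or raw_data['x'][i-1] != raw_data['x'][i]:
--             min_dimension_size = find_shortest_list(i, rebuilded_data, dimension, min_dimension_size)
--             append_df_list(raw_data, rebuilded_data, dimension, i)
--             dimension += 1
--         else:
--             append_data(raw_data, rebuilded_data, dimension-1, i)
--     min_dimension_size = find_shortest_list(i, rebuilded_data, dimension, min_dimension_size)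
--     for key in rebuilded_data.keys():
--         for i in range(0, dimension):
--             rebuilded_data[key][i] = rebuilded_data[key][i][:min_dimension_size]
--     return rebuilded_data
-- ===== SOURCE B (Python) =====
-- def rebuild_data(raw_data):
--     xs = raw_data['x']
--     bounds = [i for i in range(len(xs)) if i == 0 or xs[i - 1] != xs[i]] + [len(xs)]
--     pairs = list(zip(bounds, bounds[1:]))
--     m = min(min(e - s for s, e in pairs), 2 ** 30)
--     return {key: [raw_data.get(key, [])[s:s + m] for s, e in pairs]
--             for key in ('x', 'y', 'z')}
-- ===== Notes on version B (the rewrite author's own statement) =====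
-- stated objective: simpler
-- what changed: B computes the run boundaries of the x-column in one pass and builds each of the three output columns by slicing the source column (raw_data.get(key, [])) directly to the already-truncated group size, replacing A's stateful per-row dict mutation (append_data/append_df_list) and its separate post-loop truncation pass; Pre_ excludes inputs where A raises (missing 'x', empty 'x' column, an extra key, a column shorter than 'x') and association lists with duplicate keys, which no Python dict can present and whose first-match reading is accidental.
-- outside the precondition, e.g. on rebuild_data({}): A raises KeyError, B raises KeyError
import Mathlib
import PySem

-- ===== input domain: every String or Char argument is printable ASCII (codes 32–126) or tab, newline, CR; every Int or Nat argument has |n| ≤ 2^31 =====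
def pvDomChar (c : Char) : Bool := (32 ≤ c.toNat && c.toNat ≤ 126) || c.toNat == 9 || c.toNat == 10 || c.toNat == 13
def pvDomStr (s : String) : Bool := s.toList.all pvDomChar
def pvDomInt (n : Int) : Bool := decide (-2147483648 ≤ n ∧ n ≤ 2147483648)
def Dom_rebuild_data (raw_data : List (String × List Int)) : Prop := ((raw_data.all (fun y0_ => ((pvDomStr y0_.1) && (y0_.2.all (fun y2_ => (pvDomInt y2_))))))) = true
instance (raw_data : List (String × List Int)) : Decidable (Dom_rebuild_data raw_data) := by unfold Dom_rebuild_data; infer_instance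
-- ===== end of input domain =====

-- B groups the rows by run boundaries computed once and slices each column directly to the
-- already-truncated group size, instead of A's element-by-element stateful appends; objective: simpler.

-- ===== PORT A =====
-- append_data: for key in raw_data.keys(): rebuilded_data[key][dimension].append(raw_data[key][i]).
-- Exact under Pre_ (keys = {x,y,z} so no KeyError, i and dimension in range so no IndexError).
def pyAppendData (raw : PySem.Dict String (List Int))
    (reb : PySem.Dict String (List (List Int))) (dim i : Nat) :
    PySem.Dict String (List (List Int)) :=
  raw.keys.foldl (fun reb key =>
    reb.modify key [] (fun gs =>
      PySem.List.pySetD gs (dim : Int) ((gs.getD dim []) ++ [(raw.getD key []).getD i 0]))) reb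

-- append_df_list: append [] to every rebuilded_data[key], then append_data.
def pyAppendDfList (raw : PySem.Dict String (List Int))
    (reb : PySem.Dict String (List (List Int))) (dim i : Nat) :
    PySem.Dict String (List (List Int)) :=
  pyAppendData raw
    (reb.keys.foldl (fun reb key => reb.modify key [] (fun gs => gs ++ [([] : List Int)])) reb)
    dim i

-- find_shortest_list (min_dimension_size stays a nonnegative int: lengths and 2**30).
def pyFindShortest (i : Nat) (reb : PySem.Dict String (List (List Int)))
    (dim : Nat) (minSize : Nat) : Nat :=
  if i ≠ 0 ∧ ((reb.getD "x" []).getD (dim - 1) []).length < minSize then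
    ((reb.getD "x" []).getD (dim - 1) []).length
  else minSize

def rebuild_data (raw_data : List (String × List Int)) : List (String × List (List Int)) :=
  let raw := PySem.Dict.mk raw_data
  let xs := raw.getD "x" []          -- raw_data['x']; KeyError (missing key) excluded by Pre_
  let st := (List.range xs.length).foldl
    (fun (st : Nat × PySem.Dict String (List (List Int)) × Nat) i =>
      if i = 0 ∨ xs.getD (i - 1) 0 ≠ xs.getD i 0 then
        (st.1 + 1, pyAppendDfList raw st.2.1 st.1 i, pyFindShortest i st.2.1 st.1 st.2.2)
      else
        (st.1, pyAppendData raw st.2.1 (st.1 - 1) i, st.2.2))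
    (0, PySem.Dict.mk [("x", []), ("y", []), ("z", [])], 2 ^ 30)
  -- after the loop Python reads the loop variable i = len-1 (NameError on empty 'x': excluded by Pre_)
  let minSize := pyFindShortest (xs.length - 1) st.2.1 st.1 st.2.2
  st.2.1.items.map (fun kv =>
    (kv.1, (List.range st.1).foldl
      (fun gs (j : Nat) => PySem.List.pySetD gs (j : Int) ((gs.getD j []).take minSize)) kv.2))

-- ===== PORT B =====
-- run-start indices: [i for i in range(len(xs)) if i == 0 or xs[i-1] != xs[i]] (indices are in range)
def altStarts (xs : List Int) : List Nat :=
  (List.range xs.length).filter (fun i => i == 0 || xs.getD (i - 1) 0 != xs.getD i 0)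

def rebuild_data_alt (raw_data : List (String × List Int)) : List (String × List (List Int)) :=
  let raw := PySem.Dict.mk raw_data
  let xs := raw.getD "x" []          -- raw_data['x']; KeyError (missing key) excluded by Pre_
  let bounds := altStarts xs ++ [xs.length]
  let pairs := bounds.zip bounds.tail
  -- min(min(e - s for s, e in pairs), 2 ** 30); Python's inner min raises ValueError when
  -- pairs is empty (empty 'x' column): excluded by Pre_
  let m := match pairs.map (fun p => p.2 - p.1) with
    | [] => 0
    | h :: t => Nat.min (t.foldl Nat.min h) (2 ^ 30)
  -- {key: [raw_data.get(key, [])[s:s+m] for s, e in pairs] for key in ('x', 'y', 'z')}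
  ["x", "y", "z"].map (fun key =>
    (key, pairs.map (fun p =>
      PySem.List.slice (raw.getD key []) (some (p.1 : Int)) (some ((p.1 : Int) + (m : Int))))))

-- ===== PRECONDITION & SPEC =====
-- Pre_ excludes: inputs on which A raises (no key 'x' → KeyError; empty 'x' list → NameError on
-- the post-loop loop variable; a key outside {'x','y','z'} → KeyError; a column shorter than the
-- 'x' column → IndexError), and association lists with duplicate keys, which cannot arise from a
-- Python dict and on which first-match semantics is accidental.
def Pre_rebuild_data (raw_data : List (String × List Int)) : Prop :=
  (raw_data.map Prod.fst).Nodup ∧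
  (∀ p ∈ raw_data, p.1 = "x" ∨ p.1 = "y" ∨ p.1 = "z") ∧
  "x" ∈ raw_data.map Prod.fst ∧
  (PySem.Dict.mk raw_data).getD "x" [] ≠ [] ∧
  (∀ p ∈ raw_data, ((PySem.Dict.mk raw_data).getD "x" []).length ≤ p.2.length)
instance (raw_data : List (String × List Int)) : Decidable (Pre_rebuild_data raw_data) := by
  unfold Pre_rebuild_data; infer_instance

def pvWitness_rebuild_data : (List (String × List Int)) := [("x", [1, 1, 2]), ("y", [3, 4, 5])]

def Spec_rebuild_data (raw_data : List (String × List Int)) (out : List (String × List (List Int))) : Prop := out = rebuild_data_alt raw_data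
instance (raw_data : List (String × List Int)) (out : List (String × List (List Int))) : Decidable (Spec_rebuild_data raw_data out) := by unfold Spec_rebuild_data; infer_instance

-- ===== CLAIM (what is proved, stated in full; the proofs are below) =====
def Claim_equal_rebuild_data : Prop := ∀ (raw_data : List (String × List Int)), Dom_rebuild_data raw_data → Pre_rebuild_data raw_data → Spec_rebuild_data raw_data (rebuild_data raw_data)

-- ===== LEMMAS AND PROOFS =====

-- the literal three-key dict {'x': gx, 'y': gy, 'z': gz}
def dict3 (gx gy gz : List (List Int)) : PySem.Dict String (List (List Int)) :=
  PySem.Dict.mk [("x", gx), ("y", gy), ("z", gz)]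

-- run-start indices among the first i rows
def startsUpTo (xs : List Int) (i : Nat) : List Nat :=
  (List.range i).filter (fun i => i == 0 || xs.getD (i - 1) 0 != xs.getD i 0)

def pairsOf (b : List Nat) : List (Nat × Nat) := b.zip b.tail

-- the (start, end) segments of the first i rows (the last segment still open: it ends at i)
def segsUpTo (xs : List Int) (i : Nat) : List (Nat × Nat) := pairsOf (startsUpTo xs i ++ [i])

def segGroups (l : List Int) (xs : List Int) (i : Nat) : List (List Int) :=
  (segsUpTo xs i).map (fun p => (l.drop p.1).take (p.2 - p.1))

-- what A's rebuilded_data[k] holds after the first i rows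
def keyGroups (raw : PySem.Dict String (List Int)) (k : String) (i : Nat) : List (List Int) :=
  if k ∈ raw.keys then segGroups (raw.getD k []) (raw.getD "x" []) i
  else (segsUpTo (raw.getD "x" []) i).map (fun _ => [])

-- what A's min_dimension_size holds after the first i rows: min over the CLOSED runs
def minUpTo (xs : List Int) (i : Nat) : Nat :=
  ((pairsOf (startsUpTo xs i)).map (fun p => p.2 - p.1)).foldl Nat.min (2 ^ 30)

theorem modify_dict3 (gx gy gz : List (List Int)) (k : String)
    (hk : k = "x" ∨ k = "y" ∨ k = "z") (f : List (List Int) → List (List Int)) :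
    (dict3 gx gy gz).modify k [] f =
      dict3 (if k = "x" then f gx else gx) (if k = "y" then f gy else gy)
        (if k = "z" then f gz else gz) := by
  rcases hk with h | h | h <;> subst h <;>
    simp [dict3, PySem.Dict.modify, PySem.Dict.insert, PySem.Dict.getD, PySem.Dict.get?,
      PySem.Dict.contains]

theorem getD_dict3_x (gx gy gz : List (List Int)) :
    (dict3 gx gy gz).getD "x" [] = gx := by
  simp [dict3, PySem.Dict.getD, PySem.Dict.get?]

theorem keys_dict3 (gx gy gz : List (List Int)) :
    (dict3 gx gy gz).keys = ["x", "y", "z"] := by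
  simp [dict3]

theorem foldl_modify_dict3 (ks : List String) (hsub : ∀ k ∈ ks, k = "x" ∨ k = "y" ∨ k = "z")
    (hnd : ks.Nodup) (φ : String → List (List Int) → List (List Int))
    (gx gy gz : List (List Int)) :
    ks.foldl (fun d k => d.modify k [] (φ k)) (dict3 gx gy gz) =
      dict3 (if "x" ∈ ks then φ "x" gx else gx) (if "y" ∈ ks then φ "y" gy else gy)
        (if "z" ∈ ks then φ "z" gz else gz) := by
  induction ks generalizing gx gy gz with
  | nil => simp
  | cons k ks ih =>
    have hk := hsub k (List.mem_cons_self)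
    have hnotin : k ∉ ks := (List.nodup_cons.mp hnd).1
    simp only [List.foldl_cons, modify_dict3 gx gy gz k hk (φ k)]
    rw [ih (fun q hq => hsub q (List.mem_cons_of_mem _ hq)) (List.nodup_cons.mp hnd).2]
    rcases hk with h | h | h <;> subst h <;> simp_all [List.mem_cons, eq_comm]

-- pyAppendData on a literal three-key dict, keywise
theorem pyAppendData_dict3 (raw : PySem.Dict String (List Int))
    (hnd : raw.keys.Nodup) (hsub : ∀ k ∈ raw.keys, k = "x" ∨ k = "y" ∨ k = "z")
    (gx gy gz : List (List Int)) (dim i : Nat) :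
    pyAppendData raw (dict3 gx gy gz) dim i =
      dict3
        (if "x" ∈ raw.keys then
          PySem.List.pySetD gx (dim : Int) ((gx.getD dim []) ++ [(raw.getD "x" []).getD i 0]) else gx)
        (if "y" ∈ raw.keys then
          PySem.List.pySetD gy (dim : Int) ((gy.getD dim []) ++ [(raw.getD "y" []).getD i 0]) else gy)
        (if "z" ∈ raw.keys then
          PySem.List.pySetD gz (dim : Int) ((gz.getD dim []) ++ [(raw.getD "z" []).getD i 0]) else gz) := by
  exact foldl_modify_dict3 raw.keys hsub hnd
    (fun k gs => PySem.List.pySetD gs (dim : Int) ((gs.getD dim []) ++ [(raw.getD k []).getD i 0]))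
    gx gy gz

theorem pyAppendDfList_dict3 (raw : PySem.Dict String (List Int))
    (gx gy gz : List (List Int)) (dim i : Nat) :
    pyAppendDfList raw (dict3 gx gy gz) dim i =
      pyAppendData raw (dict3 (gx ++ [[]]) (gy ++ [[]]) (gz ++ [[]])) dim i := by
  unfold pyAppendDfList
  rw [keys_dict3]
  rw [foldl_modify_dict3 ["x", "y", "z"] (by decide) (by decide) (fun _ gs => gs ++ [[]]) gx gy gz]
  simp

theorem getD_append_cons (q : List (List Int)) (x : List Int) (r : List (List Int)) :
    (q ++ x :: r).getD q.length [] = x := by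
  simp [List.getD_eq_getElem?_getD]

theorem pySetD_append_cons (q : List (List Int)) (x v : List Int) (rest : List (List Int)) :
    PySem.List.pySetD (q ++ x :: rest) (q.length : Int) v = q ++ v :: rest := by
  simp [PySem.List.pySetD, PySem.List.pySet?, PySem.List.pyIdx?]

theorem foldl_min_le_init {l : List Nat} {a : Nat} : l.foldl Nat.min a ≤ a := by
  induction l generalizing a with
  | nil => exact le_rfl
  | cons y l ih => exact le_trans ih (Nat.min_le_left _ _)

theorem foldl_min_le_mem {l : List Nat} {x a : Nat} (hx : x ∈ l) : l.foldl Nat.min a ≤ x := by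
  induction l generalizing a with
  | nil => cases hx
  | cons y l ih =>
    simp only [List.foldl_cons]
    rcases List.mem_cons.mp hx with h | h
    · subst h
      exact le_trans foldl_min_le_init (Nat.min_le_right _ _)
    · exact ih h

theorem foldl_min_min (l : List Nat) (a b : Nat) :
    Nat.min (l.foldl Nat.min a) b = l.foldl Nat.min (Nat.min a b) := by
  induction l generalizing a with
  | nil => rfl
  | cons x l ih =>
    simp only [List.foldl_cons]
    rw [ih]
    congr 1
    simp only [Nat.min_def]
    split_ifs <;> omega

theorem startsUpTo_succ (xs : List Int) (i : Nat) :
    startsUpTo xs (i + 1) =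
      startsUpTo xs i ++ (if i = 0 ∨ xs.getD (i - 1) 0 ≠ xs.getD i 0 then [i] else []) := by
  simp only [startsUpTo, List.range_succ, List.filter_append, List.filter_cons, List.filter_nil]
  split_ifs <;> simp_all

theorem mem_startsUpTo_lt {xs : List Int} {i j : Nat} (h : j ∈ startsUpTo xs i) : j < i := by
  have := List.mem_filter.mp h
  exact List.mem_range.mp this.1

theorem startsUpTo_one (xs : List Int) : startsUpTo xs 1 = [0] := by
  simp [startsUpTo, List.range_succ]

theorem startsUpTo_ne_nil (xs : List Int) {i : Nat} (hi : 1 ≤ i) : startsUpTo xs i ≠ [] := by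
  intro h
  have h0 : (0 : Nat) ∈ startsUpTo xs i := by
    simp [startsUpTo, List.mem_filter, List.mem_range]
    omega
  rw [h] at h0
  cases h0

theorem pairsOf_append_singleton (v : List Nat) (hv : v ≠ []) (b : Nat) :
    pairsOf (v ++ [b]) = pairsOf v ++ [(v.getLast hv, b)] := by
  induction v with
  | nil => simp at hv
  | cons a v ih =>
    cases v with
    | nil => simp [pairsOf]
    | cons c v => simp_all [pairsOf, List.getLast]

theorem length_pairsOf (v : List Nat) : (pairsOf v).length = v.length - 1 := by
  simp [pairsOf]

theorem take_succ_getD (l : List Int) (s i : Nat) (hs : s ≤ i) (hi : i < l.length) :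
    (l.drop s).take (i - s) ++ [l.getD i 0] = (l.drop s).take (i + 1 - s) := by
  have h1 : i - s < (l.drop s).length := by simp; omega
  have h2 : l.getD i 0 = (l.drop s)[i - s] := by
    rw [List.getD_eq_getElem?_getD, List.getElem?_eq_getElem hi]
    simp [List.getElem_drop]
    congr 1
    omega
  have h3 : i + 1 - s = (i - s) + 1 := by omega
  rw [h2, h3, ← List.take_concat_get' _ _ h1]

theorem take_one_drop_getD (l : List Int) (i : Nat) (hi : i < l.length) :
    (l.drop i).take 1 = [l.getD i 0] := by
  have := take_succ_getD l i i (le_refl i) hi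
  simpa using this.symm

-- the truncation loop sets every slot j < gs.length to its [:M] prefix
theorem trunc_foldl (M : Nat) :
    ∀ (d : Nat) (gs : List (List Int)), d ≤ gs.length →
    (List.range d).foldl
        (fun gs (j : Nat) => PySem.List.pySetD gs (j : Int) ((gs.getD j []).take M)) gs =
      (gs.take d).map (fun g => g.take M) ++ gs.drop d := by
  intro d
  induction d with
  | zero => simp
  | succ d ih =>
    intro gs hd
    rw [List.range_succ, List.foldl_append, ih gs (by omega)]
    simp only [List.foldl_cons, List.foldl_nil]
    have hdl : d < gs.length := by omega
    have hlen : ((gs.take d).map (fun g => g.take M)).length = d := by simp; omega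
    obtain ⟨a, ha⟩ : ∃ a, gs.drop d = a :: gs.drop (d + 1) :=
      ⟨gs[d], List.drop_eq_getElem_cons hdl⟩
    rw [ha]
    have hg := getD_append_cons ((gs.take d).map (fun g => g.take M)) a (gs.drop (d + 1))
    rw [hlen] at hg
    have hs := pySetD_append_cons ((gs.take d).map (fun g => g.take M)) a (a.take M) (gs.drop (d + 1))
    rw [hlen] at hs
    rw [hg, hs]
    have htake : gs.take (d + 1) = gs.take d ++ [a] := by
      rw [List.take_add, ha]
      simp
    rw [htake]
    simp

theorem segsUpTo_eq (xs : List Int) {i : Nat} (h1i : 1 ≤ i) :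
    segsUpTo xs i = pairsOf (startsUpTo xs i) ++
      [((startsUpTo xs i).getLast (startsUpTo_ne_nil xs h1i), i)] :=
  pairsOf_append_singleton (startsUpTo xs i) (startsUpTo_ne_nil xs h1i) i

theorem length_segsUpTo (xs : List Int) {i : Nat} (h1i : 1 ≤ i) :
    (segsUpTo xs i).length = (startsUpTo xs i).length := by
  rw [segsUpTo_eq xs h1i]
  have := length_pairsOf (startsUpTo xs i)
  have hpos : 0 < (startsUpTo xs i).length :=
    List.length_pos_iff.mpr (startsUpTo_ne_nil xs h1i)
  simp [this]
  omega

theorem length_keyGroups (raw : PySem.Dict String (List Int)) (k : String) {i : Nat}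
    (h1i : 1 ≤ i) :
    (keyGroups raw k i).length = (startsUpTo (raw.getD "x" []) i).length := by
  unfold keyGroups segGroups
  split_ifs <;> simp [length_segsUpTo _ h1i]

-- appending row i as a fresh one-element group (the if-branch of A's loop), keywise
theorem keyGroups_true_step (raw : PySem.Dict String (List Int)) (k : String) {i : Nat}
    (h1i : 1 ≤ i) (hilt : i < (raw.getD "x" []).length)
    (hlenk : k ∈ raw.keys → (raw.getD "x" []).length ≤ (raw.getD k []).length)
    (hcond : i = 0 ∨ (raw.getD "x" []).getD (i - 1) 0 ≠ (raw.getD "x" []).getD i 0) :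
    (if k ∈ raw.keys then
        PySem.List.pySetD (keyGroups raw k i ++ [[]])
          (((startsUpTo (raw.getD "x" []) i).length : Nat) : Int)
          (((keyGroups raw k i ++ [[]]).getD (startsUpTo (raw.getD "x" []) i).length []) ++
            [(raw.getD k []).getD i 0])
      else keyGroups raw k i ++ [[]]) = keyGroups raw k (i + 1) := by
  have hxs := startsUpTo_succ (raw.getD "x" []) i
  rw [if_pos hcond] at hxs
  have hsegs : segsUpTo (raw.getD "x" []) (i + 1) =
      segsUpTo (raw.getD "x" []) i ++ [(i, i + 1)] := by
    unfold segsUpTo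
    rw [hxs, pairsOf_append_singleton (startsUpTo (raw.getD "x" []) i ++ [i]) (by simp) (i + 1)]
    simp
  have hGlen := length_keyGroups raw k h1i
  by_cases hk : k ∈ raw.keys
  · rw [if_pos hk]
    have hG := getD_append_cons (keyGroups raw k i) [] []
    rw [hGlen] at hG
    have hset := pySetD_append_cons (keyGroups raw k i) []
      ([] ++ [(raw.getD k []).getD i 0]) []
    rw [hGlen] at hset
    rw [hG, hset]
    have hR : keyGroups raw k (i + 1) =
        keyGroups raw k i ++ [[(raw.getD k []).getD i 0]] := by
      simp only [keyGroups, segGroups, if_pos hk]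
      rw [hsegs, List.map_append]
      simp [take_one_drop_getD (raw.getD k []) i (lt_of_lt_of_le hilt (hlenk hk))]
    rw [hR]
    simp
  · rw [if_neg hk]
    simp only [keyGroups, if_neg hk]
    rw [hsegs, List.map_append]
    simp

-- appending row i to the still-open last group (the else-branch of A's loop), keywise
theorem keyGroups_false_step (raw : PySem.Dict String (List Int)) (k : String) {i : Nat}
    (h1i : 1 ≤ i) (hilt : i < (raw.getD "x" []).length)
    (hlenk : k ∈ raw.keys → (raw.getD "x" []).length ≤ (raw.getD k []).length)
    (hcond : ¬ (i = 0 ∨ (raw.getD "x" []).getD (i - 1) 0 ≠ (raw.getD "x" []).getD i 0)) :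
    (if k ∈ raw.keys then
        PySem.List.pySetD (keyGroups raw k i)
          (((startsUpTo (raw.getD "x" []) i).length - 1 : Nat) : Int)
          (((keyGroups raw k i).getD ((startsUpTo (raw.getD "x" []) i).length - 1) []) ++
            [(raw.getD k []).getD i 0])
      else keyGroups raw k i) = keyGroups raw k (i + 1) := by
  have hSne := startsUpTo_ne_nil (raw.getD "x" []) h1i
  have hxs := startsUpTo_succ (raw.getD "x" []) i
  rw [if_neg hcond, List.append_nil] at hxs
  have hslt : (startsUpTo (raw.getD "x" []) i).getLast hSne < i :=
    mem_startsUpTo_lt (List.getLast_mem hSne)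
  have hQlen : ((pairsOf (startsUpTo (raw.getD "x" []) i)).map
      (fun p => ((raw.getD k []).drop p.1).take (p.2 - p.1))).length =
      (startsUpTo (raw.getD "x" []) i).length - 1 := by
    simp [length_pairsOf]
  have hsegs₁ : segsUpTo (raw.getD "x" []) (i + 1) =
      pairsOf (startsUpTo (raw.getD "x" []) i) ++
      [((startsUpTo (raw.getD "x" []) i).getLast hSne, i + 1)] := by
    unfold segsUpTo
    rw [hxs]
    exact pairsOf_append_singleton _ hSne (i + 1)
  by_cases hk : k ∈ raw.keys
  · rw [if_pos hk]
    simp only [keyGroups, segGroups, if_pos hk]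
    rw [segsUpTo_eq (raw.getD "x" []) h1i, hsegs₁, List.map_append, List.map_append]
    simp only [List.map_cons, List.map_nil]
    have hG := getD_append_cons ((pairsOf (startsUpTo (raw.getD "x" []) i)).map
      (fun p => ((raw.getD k []).drop p.1).take (p.2 - p.1)))
      (((raw.getD k []).drop ((startsUpTo (raw.getD "x" []) i).getLast hSne)).take
        (i - (startsUpTo (raw.getD "x" []) i).getLast hSne)) []
    rw [hQlen] at hG
    have hset := pySetD_append_cons ((pairsOf (startsUpTo (raw.getD "x" []) i)).map
      (fun p => ((raw.getD k []).drop p.1).take (p.2 - p.1)))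
      (((raw.getD k []).drop ((startsUpTo (raw.getD "x" []) i).getLast hSne)).take
        (i - (startsUpTo (raw.getD "x" []) i).getLast hSne))
      ((((raw.getD k []).drop ((startsUpTo (raw.getD "x" []) i).getLast hSne)).take
        (i - (startsUpTo (raw.getD "x" []) i).getLast hSne)) ++ [(raw.getD k []).getD i 0]) []
    rw [hQlen] at hset
    rw [hG, hset]
    rw [take_succ_getD (raw.getD k []) _ i (le_of_lt hslt) (lt_of_lt_of_le hilt (hlenk hk))]
  · rw [if_neg hk]
    simp only [keyGroups, if_neg hk]
    rw [List.map_const', List.map_const', length_segsUpTo _ h1i, length_segsUpTo _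
      (le_trans h1i (by omega)), hxs]

-- the min_dimension_size update at a fresh run start, against the closed-run minimum
theorem minUpTo_true_step (raw : PySem.Dict String (List Int)) {i : Nat}
    (h1i : 1 ≤ i) (hilt : i < (raw.getD "x" []).length) (hx : "x" ∈ raw.keys)
    (hcond : i = 0 ∨ (raw.getD "x" []).getD (i - 1) 0 ≠ (raw.getD "x" []).getD i 0) :
    pyFindShortest i
      (dict3 (keyGroups raw "x" i) (keyGroups raw "y" i) (keyGroups raw "z" i))
      (startsUpTo (raw.getD "x" []) i).length (minUpTo (raw.getD "x" []) i) =
      minUpTo (raw.getD "x" []) (i + 1) := by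
  have hSne := startsUpTo_ne_nil (raw.getD "x" []) h1i
  have hslt : (startsUpTo (raw.getD "x" []) i).getLast hSne < i :=
    mem_startsUpTo_lt (List.getLast_mem hSne)
  have hxs := startsUpTo_succ (raw.getD "x" []) i
  rw [if_pos hcond] at hxs
  unfold pyFindShortest
  rw [getD_dict3_x]
  have hQlen : ((pairsOf (startsUpTo (raw.getD "x" []) i)).map
      (fun p => ((raw.getD "x" []).drop p.1).take (p.2 - p.1))).length =
      (startsUpTo (raw.getD "x" []) i).length - 1 := by
    simp [length_pairsOf]
  have hG : (keyGroups raw "x" i).getD ((startsUpTo (raw.getD "x" []) i).length - 1) [] =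
      ((raw.getD "x" []).drop ((startsUpTo (raw.getD "x" []) i).getLast hSne)).take
        (i - (startsUpTo (raw.getD "x" []) i).getLast hSne) := by
    unfold keyGroups segGroups
    rw [if_pos hx, segsUpTo_eq (raw.getD "x" []) h1i, List.map_append]
    simp only [List.map_cons, List.map_nil]
    have := getD_append_cons ((pairsOf (startsUpTo (raw.getD "x" []) i)).map
      (fun p => ((raw.getD "x" []).drop p.1).take (p.2 - p.1)))
      (((raw.getD "x" []).drop ((startsUpTo (raw.getD "x" []) i).getLast hSne)).take
        (i - (startsUpTo (raw.getD "x" []) i).getLast hSne)) []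
    rw [hQlen] at this
    exact this
  rw [hG]
  have hglen : (((raw.getD "x" []).drop ((startsUpTo (raw.getD "x" []) i).getLast hSne)).take
      (i - (startsUpTo (raw.getD "x" []) i).getLast hSne)).length =
      i - (startsUpTo (raw.getD "x" []) i).getLast hSne := by
    simp
    omega
  rw [hglen]
  unfold minUpTo
  rw [hxs, pairsOf_append_singleton _ hSne i, List.map_append, List.foldl_append]
  simp only [List.map_cons, List.map_nil, List.foldl_cons, List.foldl_nil]
  simp only [Nat.min_def]
  split_ifs <;> omega

-- the invariant of A's main loop, for 1 ≤ i ≤ len(raw_data['x'])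
theorem loop_inv (raw : PySem.Dict String (List Int))
    (hnd : raw.keys.Nodup)
    (hsub : ∀ k ∈ raw.keys, k = "x" ∨ k = "y" ∨ k = "z")
    (hlen : ∀ k ∈ raw.keys, (raw.getD "x" []).length ≤ (raw.getD k []).length) :
    ∀ i : Nat, 1 ≤ i → i ≤ (raw.getD "x" []).length →
    (List.range i).foldl
      (fun (st : Nat × PySem.Dict String (List (List Int)) × Nat) j =>
        if j = 0 ∨ (raw.getD "x" []).getD (j - 1) 0 ≠ (raw.getD "x" []).getD j 0 then
          (st.1 + 1, pyAppendDfList raw st.2.1 st.1 j, pyFindShortest j st.2.1 st.1 st.2.2)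
        else
          (st.1, pyAppendData raw st.2.1 (st.1 - 1) j, st.2.2))
      (0, dict3 [] [] [], 2 ^ 30)
    = ((startsUpTo (raw.getD "x" []) i).length,
       dict3 (keyGroups raw "x" i) (keyGroups raw "y" i) (keyGroups raw "z" i),
       minUpTo (raw.getD "x" []) i) := by
  intro i
  induction i with
  | zero => intro h; omega
  | succ i ih =>
    intro _ hile
    have hx : "x" ∈ raw.keys := by
      by_contra hxn
      have h0 : raw.getD "x" [] = [] := by
        rw [PySem.Dict.getD_eq_get?_getD,
          (PySem.Dict.get?_eq_none_iff_not_mem_keys raw "x").mpr hxn]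
        rfl
      rw [h0] at hile
      simp only [List.length_nil] at hile
      omega
    by_cases hi0 : i = 0
    · subst hi0
      simp only [show (0 : Nat) + 1 = 1 from rfl, List.range_one, List.foldl_cons,
        List.foldl_nil]
      rw [if_pos (Or.inl trivial)]
      rw [pyAppendDfList_dict3, pyAppendData_dict3 raw hnd hsub]
      have h1n : 1 ≤ (raw.getD "x" []).length := hile
      simp only [Prod.mk.injEq]
      refine ⟨by rw [startsUpTo_one]; rfl, ?_, ?_⟩
      · have comp : ∀ k : String, (k ∈ raw.keys → (raw.getD "x" []).length ≤ (raw.getD k []).length) →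
            (if k ∈ raw.keys then
              PySem.List.pySetD (([] : List (List Int)) ++ [[]]) ((0 : Nat) : Int)
                (((([] : List (List Int)) ++ [[]]).getD 0 []) ++ [(raw.getD k []).getD 0 0])
            else ([] : List (List Int)) ++ [[]]) = keyGroups raw k 1 := by
          intro k hlenk
          have hseg1 : segsUpTo (raw.getD "x" []) 1 = [(0, 1)] := by
            unfold segsUpTo
            rw [startsUpTo_one]
            rfl
          by_cases hk : k ∈ raw.keys
          · rw [if_pos hk]
            simp only [keyGroups, segGroups, if_pos hk, hseg1]
            simp only [PySem.List.pySetD, PySem.List.pySet?, PySem.List.pyIdx?]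
            have ht : (raw.getD k []).take 1 = [(raw.getD k []).getD 0 0] := by
              simpa using take_one_drop_getD (raw.getD k []) 0 (lt_of_lt_of_le h1n (hlenk hk))
            simp [ht, List.getD_eq_getElem?_getD]
          · rw [if_neg hk]
            simp only [keyGroups, if_neg hk, hseg1]
            simp
        rw [comp "x" (fun h => hlen "x" h), comp "y" (fun h => hlen "y" h),
          comp "z" (fun h => hlen "z" h)]
      · unfold pyFindShortest
        simp [minUpTo, startsUpTo_one, pairsOf]
    · have h1i : 1 ≤ i := by omega
      have hilt : i < (raw.getD "x" []).length := by omega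
      have IH := ih h1i (le_of_lt hilt)
      rw [List.range_succ, List.foldl_append, IH]
      simp only [List.foldl_cons, List.foldl_nil]
      by_cases hcond : i = 0 ∨ (raw.getD "x" []).getD (i - 1) 0 ≠ (raw.getD "x" []).getD i 0
      · rw [if_pos hcond]
        simp only [Prod.mk.injEq]
        refine ⟨?_, ?_, ?_⟩
        · rw [startsUpTo_succ, if_pos hcond]
          simp
        · rw [pyAppendDfList_dict3, pyAppendData_dict3 raw hnd hsub]
          rw [keyGroups_true_step raw "x" h1i hilt (fun h => hlen "x" h) hcond,
            keyGroups_true_step raw "y" h1i hilt (fun h => hlen "y" h) hcond,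
            keyGroups_true_step raw "z" h1i hilt (fun h => hlen "z" h) hcond]
        · exact minUpTo_true_step raw h1i hilt hx hcond
      · rw [if_neg hcond]
        simp only [Prod.mk.injEq]
        refine ⟨?_, ?_, ?_⟩
        · rw [startsUpTo_succ, if_neg hcond]
          simp
        · rw [pyAppendData_dict3 raw hnd hsub]
          rw [keyGroups_false_step raw "x" h1i hilt (fun h => hlen "x" h) hcond,
            keyGroups_false_step raw "y" h1i hilt (fun h => hlen "y" h) hcond,
            keyGroups_false_step raw "z" h1i hilt (fun h => hlen "z" h) hcond]
        · unfold minUpTo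
          rw [startsUpTo_succ, if_neg hcond, List.append_nil]

-- one entry of A's final truncation loop equals B's directly-sliced entry
theorem final_component (raw : PySem.Dict String (List Int)) (k : String) (M' m : Nat)
    (h1n : 1 ≤ (raw.getD "x" []).length)
    (hmin : ∀ p ∈ segsUpTo (raw.getD "x" []) (raw.getD "x" []).length,
      Nat.min M' (p.2 - p.1) = m) :
    (List.range (startsUpTo (raw.getD "x" []) (raw.getD "x" []).length).length).foldl
        (fun gs (j : Nat) => PySem.List.pySetD gs (j : Int) ((gs.getD j []).take M'))
        (keyGroups raw k (raw.getD "x" []).length) =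
      (segsUpTo (raw.getD "x" []) (raw.getD "x" []).length).map (fun p =>
        PySem.List.slice (raw.getD k []) (some (p.1 : Int)) (some ((p.1 : Int) + (m : Int)))) := by
  rw [← length_keyGroups raw k h1n,
    trunc_foldl M' (keyGroups raw k (raw.getD "x" []).length).length _ le_rfl]
  rw [List.take_length, List.drop_length, List.append_nil]
  by_cases hk : k ∈ raw.keys
  · simp only [keyGroups, segGroups, if_pos hk]
    rw [List.map_map]
    refine List.map_congr_left ?_
    simp only [Function.comp]
    intro p hp
    rw [PySem.List.slice_natCast_add, List.take_take,
      show min M' (p.2 - p.1) = m from by have := hmin p hp; omega]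
  · have h0 : raw.getD k [] = [] := by
      rw [PySem.Dict.getD_eq_get?_getD,
        (PySem.Dict.get?_eq_none_iff_not_mem_keys raw k).mpr hk]
      rfl
    simp only [keyGroups, if_neg hk, List.map_map, h0]
    refine List.map_congr_left ?_
    intro p _
    simp [PySem.List.slice]

-- the final min_dimension_size truncates every group to the size of the shortest run
theorem min_fact (raw : PySem.Dict String (List Int))
    (hx : "x" ∈ raw.keys) (h1n : 1 ≤ (raw.getD "x" []).length) :
    ∀ p ∈ segsUpTo (raw.getD "x" []) (raw.getD "x" []).length,
      Nat.min
        (pyFindShortest ((raw.getD "x" []).length - 1)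
          (dict3 (keyGroups raw "x" (raw.getD "x" []).length)
            (keyGroups raw "y" (raw.getD "x" []).length)
            (keyGroups raw "z" (raw.getD "x" []).length))
          (startsUpTo (raw.getD "x" []) (raw.getD "x" []).length).length
          (minUpTo (raw.getD "x" []) (raw.getD "x" []).length))
        (p.2 - p.1) =
      ((segsUpTo (raw.getD "x" []) (raw.getD "x" []).length).map
        (fun p => p.2 - p.1)).foldl Nat.min (2 ^ 30) := by
  have hSne := startsUpTo_ne_nil (raw.getD "x" []) h1n
  have hslt : (startsUpTo (raw.getD "x" []) (raw.getD "x" []).length).getLast hSne <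
      (raw.getD "x" []).length := mem_startsUpTo_lt (List.getLast_mem hSne)
  have hQlen : ((pairsOf (startsUpTo (raw.getD "x" []) (raw.getD "x" []).length)).map
      (fun p => ((raw.getD "x" []).drop p.1).take (p.2 - p.1))).length =
      (startsUpTo (raw.getD "x" []) (raw.getD "x" []).length).length - 1 := by
    simp [length_pairsOf]
  have hG : (keyGroups raw "x" (raw.getD "x" []).length).getD
      ((startsUpTo (raw.getD "x" []) (raw.getD "x" []).length).length - 1) [] =
      ((raw.getD "x" []).drop
        ((startsUpTo (raw.getD "x" []) (raw.getD "x" []).length).getLast hSne)).take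
        ((raw.getD "x" []).length -
          (startsUpTo (raw.getD "x" []) (raw.getD "x" []).length).getLast hSne) := by
    simp only [keyGroups, segGroups, if_pos hx]
    rw [segsUpTo_eq (raw.getD "x" []) h1n, List.map_append]
    simp only [List.map_cons, List.map_nil]
    have := getD_append_cons ((pairsOf (startsUpTo (raw.getD "x" []) (raw.getD "x" []).length)).map
      (fun p => ((raw.getD "x" []).drop p.1).take (p.2 - p.1)))
      (((raw.getD "x" []).drop
        ((startsUpTo (raw.getD "x" []) (raw.getD "x" []).length).getLast hSne)).take
        ((raw.getD "x" []).length -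
          (startsUpTo (raw.getD "x" []) (raw.getD "x" []).length).getLast hSne)) []
    rw [hQlen] at this
    exact this
  have hglen : (((raw.getD "x" []).drop
      ((startsUpTo (raw.getD "x" []) (raw.getD "x" []).length).getLast hSne)).take
      ((raw.getD "x" []).length -
        (startsUpTo (raw.getD "x" []) (raw.getD "x" []).length).getLast hSne)).length =
      (raw.getD "x" []).length -
        (startsUpTo (raw.getD "x" []) (raw.getD "x" []).length).getLast hSne := by
    simp
  have hm : ((segsUpTo (raw.getD "x" []) (raw.getD "x" []).length).map
      (fun p => p.2 - p.1)).foldl Nat.min (2 ^ 30) =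
      Nat.min (minUpTo (raw.getD "x" []) (raw.getD "x" []).length)
        ((raw.getD "x" []).length -
          (startsUpTo (raw.getD "x" []) (raw.getD "x" []).length).getLast hSne) := by
    rw [segsUpTo_eq (raw.getD "x" []) h1n, List.map_append, List.foldl_append]
    simp only [List.map_cons, List.map_nil, List.foldl_cons, List.foldl_nil]
    rfl
  intro p hp
  have hple : ((segsUpTo (raw.getD "x" []) (raw.getD "x" []).length).map
      (fun p => p.2 - p.1)).foldl Nat.min (2 ^ 30) ≤ p.2 - p.1 :=
    foldl_min_le_mem (List.mem_map_of_mem hp)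
  by_cases hn1 : (raw.getD "x" []).length = 1
  · -- single row: A's end-of-loop check is skipped (i = 0), but 2^30 truncates nothing
    unfold pyFindShortest
    rw [hn1]
    simp only [ne_eq, Nat.sub_self, not_true_eq_false, false_and, if_false]
    have hseg1 : segsUpTo (raw.getD "x" []) 1 = [(0, 1)] := by
      unfold segsUpTo
      rw [startsUpTo_one]
      rfl
    rw [hn1] at hp hple
    rw [hseg1] at hp hple ⊢
    have hmu : minUpTo (raw.getD "x" []) 1 = 2 ^ 30 := by
      simp [minUpTo, startsUpTo_one, pairsOf]
    rw [hmu]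
    simp at hp
    subst hp
    simp
  · -- at least two rows: the last run was min'ed in after the loop
    unfold pyFindShortest
    rw [getD_dict3_x, hG, hglen]
    rw [hm] at hple ⊢
    have hne : ((raw.getD "x" []).length - 1 ≠ 0) := by omega
    simp only [ne_eq, hne, not_false_eq_true, true_and, Nat.min_def]
    simp only [Nat.min_def] at hple
    split_ifs at hple ⊢ <;> omega

theorem rebuild_data_spec : Claim_equal_rebuild_data := by
  intro raw_data _ hpre
  unfold Spec_rebuild_data
  obtain ⟨hnd0, hsub0, hx0, hxne, hlen0⟩ := hpre
  have hkeys : (PySem.Dict.mk raw_data).keys = raw_data.map Prod.fst := rfl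
  have hnd : (PySem.Dict.mk raw_data).keys.Nodup := by rw [hkeys]; exact hnd0
  have hsub : ∀ k ∈ (PySem.Dict.mk raw_data).keys, k = "x" ∨ k = "y" ∨ k = "z" := by
    intro k hk
    rw [hkeys] at hk
    obtain ⟨p, hp, rfl⟩ := List.mem_map.mp hk
    exact hsub0 p hp
  have hx : "x" ∈ (PySem.Dict.mk raw_data).keys := by rw [hkeys]; exact hx0
  have hlen : ∀ k ∈ (PySem.Dict.mk raw_data).keys,
      ((PySem.Dict.mk raw_data).getD "x" []).length ≤
        ((PySem.Dict.mk raw_data).getD k []).length := by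
    intro k hk
    cases hq : (PySem.Dict.mk raw_data).get? k with
    | none =>
      exact absurd hk ((PySem.Dict.get?_eq_none_iff_not_mem_keys _ k).mp hq)
    | some v =>
      have hitems : (k, v) ∈ (PySem.Dict.mk raw_data).items :=
        PySem.Dict.mem_items_of_get?_eq_some _ hq
      have hgd : (PySem.Dict.mk raw_data).getD k [] = v := by
        rw [PySem.Dict.getD_eq_get?_getD, hq]
        rfl
      rw [hgd]
      exact hlen0 (k, v) hitems
  have h1n : 1 ≤ ((PySem.Dict.mk raw_data).getD "x" []).length :=
    List.length_pos_iff.mpr hxne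
  simp only [rebuild_data, rebuild_data_alt]
  rw [show PySem.Dict.mk [("x", ([] : List (List Int))), ("y", []), ("z", [])] =
    dict3 [] [] [] from rfl]
  rw [loop_inv (PySem.Dict.mk raw_data) hnd hsub hlen
    ((PySem.Dict.mk raw_data).getD "x" []).length h1n le_rfl]
  dsimp only
  have hpairs : ((altStarts ((PySem.Dict.mk raw_data).getD "x" []) ++
      [((PySem.Dict.mk raw_data).getD "x" []).length]).zip
      (altStarts ((PySem.Dict.mk raw_data).getD "x" []) ++
      [((PySem.Dict.mk raw_data).getD "x" []).length]).tail) =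
      segsUpTo ((PySem.Dict.mk raw_data).getD "x" [])
        ((PySem.Dict.mk raw_data).getD "x" []).length := rfl
  rw [hpairs]
  have hsegne : segsUpTo ((PySem.Dict.mk raw_data).getD "x" [])
      ((PySem.Dict.mk raw_data).getD "x" []).length ≠ [] := by
    intro h
    have := length_segsUpTo ((PySem.Dict.mk raw_data).getD "x" []) h1n
    rw [h] at this
    exact startsUpTo_ne_nil _ h1n (List.eq_nil_of_length_eq_zero this.symm)
  obtain ⟨h, t, hcons⟩ := List.exists_cons_of_ne_nil
    (mt (List.map_eq_nil_iff).mp hsegne :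
      (segsUpTo ((PySem.Dict.mk raw_data).getD "x" [])
        ((PySem.Dict.mk raw_data).getD "x" []).length).map (fun p => p.2 - p.1) ≠ [])
  rw [hcons]
  simp only []
  have hmeq : Nat.min (t.foldl Nat.min h) (2 ^ 30) =
      ((segsUpTo ((PySem.Dict.mk raw_data).getD "x" [])
        ((PySem.Dict.mk raw_data).getD "x" []).length).map (fun p => p.2 - p.1)).foldl
        Nat.min (2 ^ 30) := by
    rw [hcons, List.foldl_cons, foldl_min_min]
    congr 1
    simp only [Nat.min_def]
    split_ifs <;> omega
  rw [hmeq]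
  simp only [dict3, List.map_cons, List.map_nil]
  refine congrArg₂ _ (congrArg _ ?_) (congrArg₂ _ (congrArg _ ?_) (congrArg₂ _ (congrArg _ ?_) rfl))
  · exact final_component (PySem.Dict.mk raw_data) "x" _ _ h1n
      (min_fact (PySem.Dict.mk raw_data) hx h1n)
  · exact final_component (PySem.Dict.mk raw_data) "y" _ _ h1n
      (min_fact (PySem.Dict.mk raw_data) hx h1n)
  · exact final_component (PySem.Dict.mk raw_data) "z" _ _ h1n
      (min_fact (PySem.Dict.mk raw_data) hx h1n)
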